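-- pv_equiv track=rewrite | github.com/mhogervo/SU3_irreps | necklaces.py | largestDomain
-- ===== SOURCE A (Python) =====
-- def largestDomain(necklace):
--     # A necklace is of the form (i1, i2, i3, ...). A domain is a group of neighboring beads of the same color.
--     # This function computes the size of the largest domain.
--
--     # the array walls contains the positions of all the domain walls
--     walls, L = [], len(necklace)
--     for pos in range(L):
--         i,j = necklace[pos-1], necklace[pos]
--         if i != j: walls.append(pos)
--
--     if walls == []:
--         return len(necklace)
--     else:
--         number_walls = len(walls)
--         sizeOfDomains = [((walls[i] - walls[i-1]) % L) for i in range(number_walls)]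
--         return max(sizeOfDomains)
-- ===== SOURCE B (Python) =====
-- def largestDomain(necklace):
--     # Run-length view: collect lengths of consecutive equal beads in one pass,
--     # then merge the first and last run when the necklace wraps around.
--     if not necklace:
--         return 0
--     runs = []
--     cur = 1
--     for prev, x in zip(necklace, necklace[1:]):
--         if x == prev:
--             cur += 1
--         else:
--             runs.append(cur)
--             cur = 1
--     runs.append(cur)
--     best = max(runs)
--     if len(runs) > 1 and necklace[0] == necklace[-1]:
--         best = max(best, runs[0] + runs[-1])
--     return best
-- ===== Notes on version B (the rewrite author's own statement) =====
-- stated objective: alternative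
-- what changed: A records domain-wall positions via circular indexing and takes the max of pairwise wall differences mod L; B makes one run-length pass over adjacent pairs and merges the first and last run when the necklace wraps.
import Mathlib
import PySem

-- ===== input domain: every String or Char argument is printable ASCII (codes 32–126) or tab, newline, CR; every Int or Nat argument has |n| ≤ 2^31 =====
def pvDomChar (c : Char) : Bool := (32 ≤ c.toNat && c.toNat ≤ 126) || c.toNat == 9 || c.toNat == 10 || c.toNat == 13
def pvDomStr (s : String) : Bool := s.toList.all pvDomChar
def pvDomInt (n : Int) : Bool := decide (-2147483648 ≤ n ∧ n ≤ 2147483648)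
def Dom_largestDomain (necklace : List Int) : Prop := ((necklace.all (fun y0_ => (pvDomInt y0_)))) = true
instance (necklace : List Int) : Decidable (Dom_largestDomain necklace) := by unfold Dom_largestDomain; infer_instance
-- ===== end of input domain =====

-- B replaces A's wall-position/mod arithmetic by a single run-length pass with an explicit circular merge of the first and last run (alternative decomposition, same cost).

-- ===== PORT A =====
def largestDomain (necklace : List Int) : Int :=
  let L : Int := necklace.length
  let walls : List Int :=
    (PySem.List.pyRange 0 L 1).foldl
      (fun walls pos =>
        let i := PySem.List.pyGetD necklace (pos - 1) 0
        let j := PySem.List.pyGetD necklace pos 0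
        if i ≠ j then walls ++ [pos] else walls)
      []
  if walls = [] then L
  else
    let numberWalls : Int := walls.length
    let sizeOfDomains : List Int :=
      (PySem.List.pyRange 0 numberWalls 1).map
        (fun i => PySem.Int.mod (PySem.List.pyGetD walls i 0 - PySem.List.pyGetD walls (i - 1) 0) L)
    -- Python max(sizeOfDomains); sizeOfDomains is nonempty in this branch
    (PySem.List.max? sizeOfDomains id).getD 0

-- ===== PORT B =====
def largestDomain_alt (necklace : List Int) : Int :=
  match necklace with
  | [] => 0
  | x :: xs =>
    let st := (List.zip (x :: xs) xs).foldl
      (fun (s : List Int × Int) pr => if pr.2 = pr.1 then (s.1, s.2 + 1) else (s.1 ++ [s.2], 1))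
      ([], 1)
    let runs := st.1 ++ [st.2]
    let best := (PySem.List.max? runs id).getD 0
    if 1 < (runs.length : Int) ∧ x = PySem.List.pyGetD (x :: xs) (-1) 0 then
      max best (PySem.List.pyGetD runs 0 0 + PySem.List.pyGetD runs (-1) 0)
    else best

-- ===== PRECONDITION & SPEC =====
def Spec_largestDomain (necklace : List Int) (out : Int) : Prop := out = largestDomain_alt necklace
instance (necklace : List Int) (out : Int) : Decidable (Spec_largestDomain necklace out) := by unfold Spec_largestDomain; infer_instance

-- ===== CLAIM (what is proved, stated in full; the proofs are below) =====
def Claim_equal_largestDomain : Prop := ∀ (necklace : List Int), Dom_largestDomain necklace → Spec_largestDomain necklace (largestDomain necklace)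

-- ===== LEMMAS AND PROOFS =====

-- run lengths of consecutive equal values; v = current value, c = current count
def pvRuns : Int → Int → List Int → List Int
  | _, c, [] => [c]
  | v, c, y :: ys => if y = v then pvRuns v (c + 1) ys else c :: pvRuns y 1 ys

-- wall positions strictly after the start; s = absolute position of the next element
def pvCuts : Int → Int → List Int → List Int
  | _, _, [] => []
  | v, s, y :: ys => if y = v then pvCuts v (s + 1) ys else s :: pvCuts y (s + 1) ys

-- boundary positions derived from run lengths (all but after the last run)
def pvAcc : Int → List Int → List Int
  | _, [] => []
  | t, r :: rs => if rs = [] then [] else (t + r) :: pvAcc (t + r) rs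

lemma pvRuns_ne_nil (l : List Int) (v c : Int) : pvRuns v c l ≠ [] := by
  induction l generalizing v c with
  | nil => simp [pvRuns]
  | cons y ys ih => simp only [pvRuns]; split <;> simp [ih]

lemma pvRuns_pos (l : List Int) (v c : Int) (hc : 1 ≤ c) :
    ∀ r ∈ pvRuns v c l, 1 ≤ r := by
  induction l generalizing v c with
  | nil => simpa [pvRuns] using hc
  | cons y ys ih =>
    simp only [pvRuns]; split
    · exact ih _ _ (by omega)
    · intro r hr
      rcases List.mem_cons.1 hr with h | h
      · omega
      · exact ih _ 1 le_rfl r h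

lemma pvRuns_sum (l : List Int) (v c : Int) :
    (pvRuns v c l).sum = c + l.length := by
  induction l generalizing v c with
  | nil => simp [pvRuns]
  | cons y ys ih =>
    simp only [pvRuns]; split
    · rw [ih]; simp only [List.length_cons]; push_cast; ring
    · simp only [List.sum_cons, ih, List.length_cons]; push_cast; ring

lemma pvRuns_len_one (l : List Int) (v c : Int)
    (h : (pvRuns v c l).length = 1) : ∀ z ∈ l, z = v := by
  induction l generalizing v c with
  | nil => simp
  | cons y ys ih =>
    simp only [pvRuns] at h
    by_cases hy : y = v
    · simp only [if_pos hy] at h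
      intro z hz
      rcases List.mem_cons.1 hz with rfl | hz
      · exact hy
      · exact ih _ _ h z hz
    · rw [if_neg hy] at h
      simp only [List.length_cons] at h
      exact absurd (List.length_eq_zero_iff.1 (by omega)) (pvRuns_ne_nil ys y 1)

lemma pvRuns_len_two (l : List Int) (v c : Int)
    (h : (pvRuns v c l).length = 2) : (v :: l).getLast (by simp) ≠ v := by
  induction l generalizing v c with
  | nil => simp [pvRuns] at h
  | cons y ys ih =>
    simp only [pvRuns] at h
    by_cases hy : y = v
    · rw [if_pos hy] at h
      subst hy
      have := ih y (c + 1) h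
      simpa [List.getLast_cons] using this
    · rw [if_neg hy] at h
      simp only [List.length_cons] at h
      have hall := pvRuns_len_one ys y 1 (by omega)
      have hy2 : (y :: ys).getLast (by simp) = y := by
        rcases List.eq_nil_or_concat ys with rfl | ⟨zs, z, rfl⟩
        · simp
        · have hz : z = y := hall z (by simp)
          simp [hz]
      rw [List.getLast_cons (by simp), hy2]
      exact hy

-- B's fold produces exactly pvRuns (split as init ++ [last count])
lemma foldB_eq (l : List Int) (v c : Int) (acc : List Int) :
    (((List.zip (v :: l) l).foldl
        (fun (s : List Int × Int) pr => if pr.2 = pr.1 then (s.1, s.2 + 1) else (s.1 ++ [s.2], 1))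
        (acc, c)).1
      ++ [((List.zip (v :: l) l).foldl
        (fun (s : List Int × Int) pr => if pr.2 = pr.1 then (s.1, s.2 + 1) else (s.1 ++ [s.2], 1))
        (acc, c)).2]) = acc ++ pvRuns v c l := by
  induction l generalizing v c acc with
  | nil => simp [pvRuns]
  | cons y ys ih =>
    simp only [List.zip_cons_cons, List.foldl_cons, pvRuns]
    by_cases hy : y = v
    · subst hy
      rw [if_pos rfl, if_pos rfl]
      exact ih y (c + 1) acc
    · simp only [if_neg hy]
      rw [ih y 1 (acc ++ [c])]
      simp

lemma pvCuts_eq_acc (l : List Int) (v c s : Int) :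
    pvCuts v s l = pvAcc (s - c) (pvRuns v c l) := by
  induction l generalizing v c s with
  | nil => simp [pvCuts, pvRuns, pvAcc]
  | cons y ys ih =>
    simp only [pvCuts, pvRuns]
    by_cases hy : y = v
    · rw [if_pos hy, if_pos hy, ih v (c + 1) (s + 1)]
      congr 1; ring
    · rw [if_neg hy, if_neg hy]
      have hne := pvRuns_ne_nil ys y 1
      simp only [pvAcc, if_neg hne]
      rw [ih y 1 (s + 1)]
      have e1 : s + 1 - 1 = s := by ring
      have e2 : s - c + c = s := by ring
      rw [e1, e2]


-- index shift for cons under Python indexing (used only with the index in range)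
lemma pyGetD_cons_shift {α : Type} (z : α) (zs : List α) (p : Int) (d : α)
    (h1 : 1 ≤ p) (h2 : p ≤ (zs.length : Int)) :
    PySem.List.pyGetD (z :: zs) p d = PySem.List.pyGetD zs (p - 1) d := by
  rw [PySem.List.pyGetD_eq_getElem (z :: zs) d (by omega) (by simp; omega),
      PySem.List.pyGetD_eq_getElem zs d (by omega) (by simp; omega)]
  have hp : p.toNat = (p - 1).toNat + 1 := by omega
  simp only [hp, List.getElem_cons_succ]

-- positions of a filtered index range, as enumerate
lemma filtIdx {α : Type} (Q : α → Bool) (d : α) (m : List α) : ∀ s : Int,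
    (PySem.List.pyRange s (s + m.length) 1).filter
        (fun p => Q (PySem.List.pyGetD m (p - s) d))
      = ((PySem.List.enumerate m s).filter (fun pr => Q pr.2)).map (·.1) := by
  induction m with
  | nil =>
    intro s
    rw [show s + (([] : List α).length : Int) = s by simp,
        PySem.List.pyRange_one_eq_nil le_rfl]
    simp [PySem.List.enumerate_nil]
  | cons z zs ih =>
    intro s
    rw [PySem.List.pyRange_one_cons (by simp only [List.length_cons]; push_cast; omega)]
    rw [PySem.List.enumerate_cons]
    simp only [List.filter_cons, sub_self, PySem.List.pyGetD_zero_cons]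
    have htail : (PySem.List.pyRange (s + 1) (s + ((z :: zs).length : Int)) 1).filter
        (fun p => Q (PySem.List.pyGetD (z :: zs) (p - s) d))
        = ((PySem.List.enumerate zs (s + 1)).filter (fun pr => Q pr.2)).map (·.1) := by
      rw [List.filter_congr (q := fun p => Q (PySem.List.pyGetD zs (p - (s + 1)) d))]
      · rw [show s + ((z :: zs).length : Int) = (s + 1) + (zs.length : Int) by simp; ring]
        exact ih (s + 1)
      · intro p hp
        rw [PySem.List.mem_pyRange_one] at hp
        rw [pyGetD_cons_shift z zs (p - s) d (by omega) (by simp at hp; omega)]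
        rw [show p - s - 1 = p - (s + 1) by ring]
    rw [htail]
    cases hq : Q z <;> simp

-- a map over an index range is a map over the list
lemma mapIdx {α β : Type} (G : α → β) (d : α) (m : List α) : ∀ s : Int,
    (PySem.List.pyRange s (s + m.length) 1).map
        (fun p => G (PySem.List.pyGetD m (p - s) d))
      = m.map G := by
  induction m with
  | nil =>
    intro s
    rw [show s + (([] : List α).length : Int) = s by simp,
        PySem.List.pyRange_one_eq_nil le_rfl]
    simp
  | cons z zs ih =>
    intro s
    rw [PySem.List.pyRange_one_cons (by simp only [List.length_cons]; push_cast; omega)]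
    simp only [List.map_cons, sub_self, PySem.List.pyGetD_zero_cons]
    congr 1
    rw [List.map_congr_left (g := fun p => G (PySem.List.pyGetD zs (p - (s + 1)) d))]
    · rw [show s + ((z :: zs).length : Int) = (s + 1) + (zs.length : Int) by simp; ring]
      exact ih (s + 1)
    · intro p hp
      rw [PySem.List.mem_pyRange_one] at hp
      rw [pyGetD_cons_shift z zs (p - s) d (by omega) (by simp at hp; omega)]
      rw [show p - s - 1 = p - (s + 1) by ring]

-- the change positions of the zipped pair list are pvCuts
lemma enum_cuts (l : List Int) : ∀ v s : Int,
    (((PySem.List.enumerate (List.zip (v :: l) l) s).filter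
        (fun pr => decide (pr.2.1 ≠ pr.2.2))).map (·.1)) = pvCuts v s l := by
  induction l with
  | nil => simp [pvCuts, PySem.List.enumerate_nil]
  | cons y ys ih =>
    intro v s
    simp only [List.zip_cons_cons, PySem.List.enumerate_cons, List.filter_cons, pvCuts]
    by_cases hy : y = v
    · subst hy
      rw [if_neg (by simp : ¬(decide (y ≠ y) = true)), if_pos rfl]
      exact ih y (s + 1)
    · simp only [if_neg hy]
      have : decide (v ≠ y) = true := by simp; exact fun h => hy h.symm
      rw [this]
      simpa using ih y (s + 1)

lemma pvAcc_length (rs : List Int) : ∀ t : Int, (pvAcc t rs).length = rs.length - 1 := by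
  induction rs with
  | nil => simp [pvAcc]
  | cons r rs' ih =>
    intro t
    cases rs' with
    | nil => simp [pvAcc]
    | cons q qs =>
      rw [show pvAcc t (r :: q :: qs) = (t + r) :: pvAcc (t + r) (q :: qs) by simp [pvAcc]]
      rw [List.length_cons, ih (t + r)]
      simp

lemma getLast?_cons_ne {α : Type} (a : α) (l : List α) (h : l ≠ []) :
    (a :: l).getLast? = l.getLast? := by
  cases l with
  | nil => exact absurd rfl h
  | cons b bs => rw [List.getLast?_cons_cons]

lemma pvAcc_getLast? (rs : List Int) : ∀ t : Int, 2 ≤ rs.length →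
    (pvAcc t rs).getLast? = some (t + rs.sum - rs.getLast?.getD 0) := by
  induction rs with
  | nil => intro t h; simp at h
  | cons r rs' ih =>
    intro t h
    cases rs' with
    | nil => simp at h
    | cons q qs =>
      rw [show pvAcc t (r :: q :: qs) = (t + r) :: pvAcc (t + r) (q :: qs) by simp [pvAcc]]
      cases qs with
      | nil => simp [pvAcc]; ring
      | cons q2 qs2 =>
        have hne : pvAcc (t + r) (q :: q2 :: qs2) ≠ [] := by
          have hl := pvAcc_length (q :: q2 :: qs2) (t + r)
          intro hnil; rw [hnil] at hl; simp at hl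
        rw [getLast?_cons_ne _ _ hne, ih (t + r) (by simp)]
        congr 1
        simp only [List.sum_cons, List.getLast?_cons_cons]
        ring_nf

-- consecutive differences of t :: pvAcc t rs are the run lengths except the last
lemma gaps_cons_acc (rs : List Int) : ∀ t : Int,
    (List.zip (t :: pvAcc t rs) (pvAcc t rs)).map (fun pr => pr.2 - pr.1) = rs.dropLast := by
  induction rs with
  | nil => simp [pvAcc]
  | cons r rs' ih =>
    intro t
    cases rs' with
    | nil => simp [pvAcc]
    | cons q qs =>
      rw [show pvAcc t (r :: q :: qs) = (t + r) :: pvAcc (t + r) (q :: qs) by simp [pvAcc]]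
      rw [List.zip_cons_cons, List.map_cons, ih (t + r)]
      rw [show (r :: q :: qs).dropLast = r :: (q :: qs).dropLast by simp]
      congr 1
      ring

-- consecutive differences inside pvAcc t rs are the middle run lengths
lemma gaps_acc (rs : List Int) (t : Int) :
    (List.zip (pvAcc t rs) ((pvAcc t rs).tail)).map (fun pr => pr.2 - pr.1)
      = rs.tail.dropLast := by
  cases rs with
  | nil => simp [pvAcc]
  | cons r rs' =>
    cases rs' with
    | nil => simp [pvAcc]
    | cons q qs =>
      rw [show pvAcc t (r :: q :: qs) = (t + r) :: pvAcc (t + r) (q :: qs) by simp [pvAcc],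
          List.tail_cons]
      exact gaps_cons_acc (q :: qs) (t + r)

-- the size comprehension of A, unrolled: wrap-around entry then adjacent differences
lemma sizes_eq (w : List Int) (L : Int) (hw : w ≠ []) :
    (PySem.List.pyRange 0 ((w.length : Int)) 1).map
        (fun i => PySem.Int.mod (PySem.List.pyGetD w i 0 - PySem.List.pyGetD w (i - 1) 0) L)
      = PySem.Int.mod (w.headD 0 - w.getLast hw) L
          :: (List.zip w w.tail).map (fun pr => PySem.Int.mod (pr.2 - pr.1) L) := by
  match w, hw with
  | w0 :: wr, hw =>
    rw [PySem.List.pyRange_one_cons (by simp)]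
    rw [List.map_cons]
    congr 1
    · rw [show (0 : Int) - 1 = -1 by ring]
      rw [PySem.List.pyGetD_neg_one _ _ hw, PySem.List.pyGetD_zero_cons, List.headD_cons]
    · have hlen : ((w0 :: wr).length : Int) = 1 + ((List.zip (w0 :: wr) wr).length : Int) := by
        simp [List.length_zip]; ring
      rw [List.map_congr_left
            (g := fun i => (fun pr => PySem.Int.mod (pr.2 - pr.1) L)
              (PySem.List.pyGetD (List.zip (w0 :: wr) wr) (i - 1) ((0 : Int), (0 : Int))))]
      · rw [hlen]
        exact mapIdx (fun pr => PySem.Int.mod (pr.2 - pr.1) L) ((0 : Int), (0 : Int))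
          (List.zip (w0 :: wr) wr) 1
      · intro i hi
        rw [PySem.List.mem_pyRange_one] at hi
        have hzl : (List.zip (w0 :: wr) wr).length = wr.length := by simp [List.length_zip]
        rw [PySem.List.pyGetD_eq_getElem (List.zip (w0 :: wr) wr) ((0 : Int), (0 : Int))
              (by omega) (by simp [List.length_zip] at hi ⊢; omega)]
        rw [List.getElem_zip]
        rw [PySem.List.pyGetD_eq_getElem (w0 :: wr) 0 (by omega) (by simp at hi ⊢; omega),
            PySem.List.pyGetD_eq_getElem (w0 :: wr) 0 (by omega) (by simp at hi ⊢; omega)]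
        have hidx : i.toNat = (i - 1).toNat + 1 := by omega
        simp only [hidx, List.getElem_cons_succ]

lemma len_le_sum (rs : List Int) (h : ∀ r ∈ rs, 1 ≤ r) : (rs.length : Int) ≤ rs.sum := by
  induction rs with
  | nil => simp
  | cons b bs ihb =>
    have hb : (1 : Int) ≤ b := h b (by simp)
    have := ihb (fun r hr => h r (by simp [hr]))
    simp only [List.length_cons, List.sum_cons]
    push_cast
    omega

-- an element of a length-≥2 list of positive integers is < the sum plus slack
lemma elem_bound (rs : List Int) (h1 : ∀ r ∈ rs, 1 ≤ r) :
    ∀ r ∈ rs, r + (rs.length : Int) ≤ rs.sum + 1 := by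
  induction rs with
  | nil => simp
  | cons a rs' ih =>
    have hlen : (rs'.length : Int) ≤ rs'.sum :=
      len_le_sum rs' (fun r hr => h1 r (by simp [hr]))
    intro r hr
    rcases List.mem_cons.1 hr with rfl | hr'
    · simp only [List.length_cons, List.sum_cons]
      push_cast
      omega
    · have := ih (fun x hx => h1 x (by simp [hx])) r hr'
      have ha : (1 : Int) ≤ a := h1 a (by simp)
      simp only [List.length_cons, List.sum_cons]
      push_cast at this ⊢
      omega

-- Python max of a nonempty list is the (unique) maximal value
lemma maxD_eq (xs : List Int) (m : Int) (hm : m ∈ xs) (hub : ∀ y ∈ xs, y ≤ m) :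
    (PySem.List.max? xs id).getD 0 = m := by
  have hne : xs ≠ [] := by rintro rfl; simp at hm
  cases h : PySem.List.max? xs id with
  | none => exact absurd ((PySem.List.max?_eq_none_iff xs id).1 h) hne
  | some a =>
    have h1 := PySem.List.max?_mem h
    have h2 := PySem.List.max?_isMax h
    have hma : m ≤ a := by simpa using h2 m hm
    have ham : a ≤ m := hub a h1
    simp [le_antisymm ham hma]


lemma mod_small (a L : Int) (h0 : 0 ≤ a) (h1 : a < L) : PySem.Int.mod a L = a := by
  rw [PySem.Int.mod_eq_emod_of_pos (by omega : (0 : Int) < L)]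
  exact Int.emod_eq_of_lt h0 h1

lemma mod_wrap (a L : Int) (h0 : 0 ≤ a) (h1 : a < L) : PySem.Int.mod (a - L) L = a := by
  rw [PySem.Int.mod_eq_emod_of_pos (by omega : (0 : Int) < L), Int.sub_emod_right]
  exact Int.emod_eq_of_lt h0 h1

lemma getLast_all_eq (x : Int) (xs : List Int) (h : ∀ z ∈ xs, z = x) :
    (x :: xs).getLast (by simp) = x := by
  rcases List.eq_nil_or_concat xs with rfl | ⟨zs, z, rfl⟩
  · simp
  · have hz : z = x := h z (by simp)
    simp [hz]

lemma pvAcc_headD (rs : List Int) (t : Int) (h : 2 ≤ rs.length) :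
    (pvAcc t rs).headD 0 = t + rs.headD 0 := by
  cases rs with
  | nil => simp at h
  | cons r rs' =>
    cases rs' with
    | nil => simp at h
    | cons q qs =>
      rw [show pvAcc t (r :: q :: qs) = (t + r) :: pvAcc (t + r) (q :: qs) by simp [pvAcc]]
      simp

-- decomposition of a list of length ≥ 2 into head, middle, last
lemma rs_shape (rs : List Int) (h : 2 ≤ rs.length) :
    rs = (rs.headD 0 :: rs.tail.dropLast) ++ [rs.getLast?.getD 0] := by
  cases rs with
  | nil => simp at h
  | cons r rs' =>
    cases rs' with
    | nil => simp at h
    | cons q qs =>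
      have hne : (q :: qs : List Int) ≠ [] := by simp
      rw [List.headD_cons, List.tail_cons, getLast?_cons_ne _ _ hne,
          List.getLast?_eq_some_getLast hne]
      simp only [Option.getD_some, List.cons_append]
      congr 1
      exact (List.dropLast_append_getLast hne).symm

-- the walls list of A, expressed through runs
lemma walls_eq (x : Int) (xs : List Int) :
    ((PySem.List.pyRange 0 (((x :: xs).length : Int)) 1).foldl
      (fun walls pos =>
        if PySem.List.pyGetD (x :: xs) (pos - 1) 0 ≠ PySem.List.pyGetD (x :: xs) pos 0
        then walls ++ [pos] else walls) [])
    = (if (x :: xs).getLast (by simp) = x then [] else [0]) ++ pvAcc 0 (pvRuns x 1 xs) := by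
  rw [PySem.List.foldl_append_ite_eq_filter
        (fun pos => PySem.List.pyGetD (x :: xs) (pos - 1) 0 ≠ PySem.List.pyGetD (x :: xs) pos 0)]
  rw [List.nil_append]
  rw [PySem.List.pyRange_one_cons (by simp only [List.length_cons]; push_cast; omega)]
  rw [List.filter_cons]
  simp only [show (0 : Int) + 1 = 1 by norm_num]
  have hhead : (decide (PySem.List.pyGetD (x :: xs) ((0 : Int) - 1) 0 ≠ PySem.List.pyGetD (x :: xs) 0 0))
      = decide (¬ (x :: xs).getLast (by simp) = x) := by
    rw [show (0 : Int) - 1 = -1 by ring,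
        PySem.List.pyGetD_neg_one _ _ (by simp : (x :: xs : List Int) ≠ []),
        PySem.List.pyGetD_zero_cons]
  have htail : (PySem.List.pyRange 1 (((x :: xs).length : Int)) 1).filter
        (fun pos => decide (PySem.List.pyGetD (x :: xs) (pos - 1) 0 ≠ PySem.List.pyGetD (x :: xs) pos 0))
      = pvAcc 0 (pvRuns x 1 xs) := by
    have hcongr : ∀ p ∈ PySem.List.pyRange 1 (((x :: xs).length : Int)) 1,
        (decide (PySem.List.pyGetD (x :: xs) (p - 1) 0 ≠ PySem.List.pyGetD (x :: xs) p 0))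
        = (fun pr => decide (pr.1 ≠ pr.2))
            (PySem.List.pyGetD (List.zip (x :: xs) xs) (p - 1) ((0 : Int), (0 : Int))) := by
      intro p hp
      rw [PySem.List.mem_pyRange_one] at hp
      rw [PySem.List.pyGetD_eq_getElem (List.zip (x :: xs) xs) ((0 : Int), (0 : Int))
            (by omega) (by simp only [List.length_zip, List.length_cons] at hp ⊢; push_cast at hp ⊢; omega)]
      rw [List.getElem_zip]
      rw [PySem.List.pyGetD_eq_getElem (x :: xs) 0 (by omega)
            (by simp only [List.length_cons] at hp ⊢; push_cast at hp ⊢; omega),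
          PySem.List.pyGetD_eq_getElem (x :: xs) 0 (by omega)
            (by simp only [List.length_cons] at hp ⊢; push_cast at hp ⊢; omega)]
      have hidx : p.toNat = (p - 1).toNat + 1 := by omega
      simp only [hidx, List.getElem_cons_succ]
    rw [List.filter_congr hcongr]
    rw [show ((x :: xs).length : Int) = 1 + ((List.zip (x :: xs) xs).length : Int) by
          simp [List.length_zip]; ring]
    rw [filtIdx (fun pr => decide (pr.1 ≠ pr.2)) ((0 : Int), (0 : Int)) (List.zip (x :: xs) xs) 1]
    rw [enum_cuts xs x 1, pvCuts_eq_acc xs x 1 1]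
    norm_num
  rw [htail, hhead]
  by_cases hg : (x :: xs).getLast (by simp) = x
  · simp [hg]
  · simp [hg]

-- B, expressed through runs
lemma alt_eq (x : Int) (xs : List Int) :
    largestDomain_alt (x :: xs)
    = (if 1 < ((pvRuns x 1 xs).length : Int) ∧ x = (x :: xs).getLast (by simp)
       then max ((PySem.List.max? (pvRuns x 1 xs) id).getD 0)
                ((pvRuns x 1 xs).headD 0 + (pvRuns x 1 xs).getLast (pvRuns_ne_nil xs x 1))
       else (PySem.List.max? (pvRuns x 1 xs) id).getD 0) := by
  have key := foldB_eq xs x 1 []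
  rw [List.nil_append] at key
  show (let st := (List.zip (x :: xs) xs).foldl
          (fun (s : List Int × Int) pr => if pr.2 = pr.1 then (s.1, s.2 + 1) else (s.1 ++ [s.2], 1))
          ([], 1)
        let runs := st.1 ++ [st.2]
        let best := (PySem.List.max? runs id).getD 0
        if 1 < (runs.length : Int) ∧ x = PySem.List.pyGetD (x :: xs) (-1) 0 then
          max best (PySem.List.pyGetD runs 0 0 + PySem.List.pyGetD runs (-1) 0)
        else best) = _
  simp only [key]
  rw [PySem.List.pyGetD_neg_one _ _ (by simp : (x :: xs : List Int) ≠ []),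
      PySem.List.pyGetD_neg_one _ _ (pvRuns_ne_nil xs x 1),
      PySem.List.pyGetD_zero]
  have hgd : (pvRuns x 1 xs).getD 0 0 = (pvRuns x 1 xs).headD 0 := by
    cases pvRuns x 1 xs <;> simp
  rw [hgd]

-- ===== VERDICT (by name: the statement is the Claim_ definition above) =====
lemma headD_mem {l : List Int} (h : l ≠ []) : l.headD 0 ∈ l := by
  cases l with
  | nil => exact absurd rfl h
  | cons a t => simp

lemma lastD_mem {l : List Int} (h : l ≠ []) : l.getLast?.getD 0 ∈ l := by
  rw [List.getLast?_eq_some_getLast h]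
  exact List.getLast_mem h

theorem largestDomain_spec : Claim_equal_largestDomain := by
  intro necklace _
  unfold Spec_largestDomain
  cases necklace with
  | nil => decide
  | cons x xs =>
    have hne : pvRuns x 1 xs ≠ [] := pvRuns_ne_nil xs x 1
    have hpos : ∀ r ∈ pvRuns x 1 xs, 1 ≤ r := pvRuns_pos xs x 1 le_rfl
    have hsum : (pvRuns x 1 xs).sum = 1 + (xs.length : Int) := pvRuns_sum xs x 1
    have hL : (((x :: xs).length : Nat) : Int) = 1 + (xs.length : Int) := by
      simp only [List.length_cons]; push_cast; ring
    rw [alt_eq x xs]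
    simp only [largestDomain]
    rw [walls_eq x xs]
    by_cases hm1 : (pvRuns x 1 xs).length = 1
    · -- a single run: no walls, the whole necklace is one domain
      obtain ⟨r, hr⟩ : ∃ r, pvRuns x 1 xs = [r] := by
        rcases h : pvRuns x 1 xs with _ | ⟨r, rest⟩
        · exact absurd h hne
        · rw [h] at hm1
          simp only [List.length_cons] at hm1
          have : rest = [] := List.length_eq_zero_iff.1 (by omega)
          exact ⟨r, by rw [this]⟩
      have hgx : (x :: xs).getLast (by simp) = x :=
        getLast_all_eq x xs (pvRuns_len_one xs x 1 hm1)
      rw [if_pos hgx]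
      rw [show pvAcc 0 (pvRuns x 1 xs) = [] by rw [hr]; simp [pvAcc]]
      rw [if_pos (by simp : ([] : List Int) ++ [] = [])]
      have hcond : ¬ (1 < (((pvRuns x 1 xs).length : Nat) : Int) ∧
          x = (x :: xs).getLast (by simp)) := by
        rintro ⟨h1, -⟩
        rw [hm1] at h1
        norm_num at h1
      rw [if_neg hcond]
      rw [maxD_eq (pvRuns x 1 xs) r (by rw [hr]; simp)
            (by intro y hy; rw [hr] at hy; simp at hy; omega)]
      have hr' : r = 1 + (xs.length : Int) := by
        rw [hr] at hsum; simpa using hsum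
      rw [hL, hr']
    · -- at least two runs
      have hm2 : 2 ≤ (pvRuns x 1 xs).length := by
        rcases h : pvRuns x 1 xs with _ | ⟨r, rest⟩
        · exact absurd h hne
        · rw [h] at hm1; simp only [List.length_cons] at hm1 ⊢; omega
      obtain ⟨M, hM⟩ : ∃ M, PySem.List.max? (pvRuns x 1 xs) id = some M := by
        cases h : PySem.List.max? (pvRuns x 1 xs) id with
        | none => exact absurd ((PySem.List.max?_eq_none_iff _ id).1 h) hne
        | some a => exact ⟨a, rfl⟩
      have hMmem : M ∈ pvRuns x 1 xs := PySem.List.max?_mem hM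
      have hMub : ∀ y ∈ pvRuns x 1 xs, y ≤ M := by
        have := PySem.List.max?_isMax hM; simpa using this
      have hMD : (PySem.List.max? (pvRuns x 1 xs) id).getD 0 = M := by rw [hM]; rfl
      have hshape := rs_shape (pvRuns x 1 xs) hm2
      have hhd1 : 1 ≤ (pvRuns x 1 xs).headD 0 := hpos _ (headD_mem hne)
      have hl1 : 1 ≤ (pvRuns x 1 xs).getLast?.getD 0 := hpos _ (lastD_mem hne)
      have hmidsub : ∀ y ∈ (pvRuns x 1 xs).tail.dropLast, y ∈ pvRuns x 1 xs := by
        intro y hy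
        rw [hshape]
        simp only [List.cons_append, List.mem_cons, List.mem_append]
        tauto
      have hbound : ∀ r ∈ pvRuns x 1 xs, r < 1 + (xs.length : Int) := by
        intro r hr
        have h1 := elem_bound (pvRuns x 1 xs) hpos r hr
        rw [hsum] at h1
        have h2 : (2 : Int) ≤ ((pvRuns x 1 xs).length : Int) := by exact_mod_cast hm2
        omega
      have hsumdec : (pvRuns x 1 xs).headD 0 + ((pvRuns x 1 xs).tail.dropLast).sum
          + (pvRuns x 1 xs).getLast?.getD 0 = 1 + (xs.length : Int) := by
        have h1 : (pvRuns x 1 xs).sum = (pvRuns x 1 xs).headD 0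
            + (((pvRuns x 1 xs).tail.dropLast).sum + (pvRuns x 1 xs).getLast?.getD 0) := by
          conv_lhs => rw [hshape]
          simp [List.sum_append]
        omega
      have hgetLast : (pvRuns x 1 xs).getLast hne = (pvRuns x 1 xs).getLast?.getD 0 := by
        rw [List.getLast?_eq_some_getLast hne]; rfl
      have haccne : pvAcc 0 (pvRuns x 1 xs) ≠ [] := by
        intro h
        have hl := pvAcc_length (pvRuns x 1 xs) 0
        rw [h] at hl; simp at hl; omega
      by_cases hgx : (x :: xs).getLast (by simp) = x
      · -- wrapped necklace: first and last runs merge into one domain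
        have hm3 : 3 ≤ (pvRuns x 1 xs).length := by
          rcases Nat.lt_or_ge (pvRuns x 1 xs).length 3 with h3 | h3
          · exfalso
            have h2 : (pvRuns x 1 xs).length = 2 := by omega
            exact pvRuns_len_two xs x 1 h2 hgx
          · exact h3
        have hmidlen : (pvRuns x 1 xs).tail.dropLast.length = (pvRuns x 1 xs).length - 2 := by
          have h1 := congrArg List.length hshape
          simp only [List.length_append, List.length_cons, List.length_nil] at h1
          omega
        have hmidsum : 1 ≤ ((pvRuns x 1 xs).tail.dropLast).sum := by
          have h1 := len_le_sum ((pvRuns x 1 xs).tail.dropLast)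
            (fun y hy => hpos y (hmidsub y hy))
          have h2 : 1 ≤ (((pvRuns x 1 xs).tail.dropLast).length : Int) := by
            rw [hmidlen]; omega
          omega
        rw [if_pos hgx, List.nil_append]
        rw [if_neg haccne]
        rw [sizes_eq (pvAcc 0 (pvRuns x 1 xs)) _ haccne]
        have hhead : (pvAcc 0 (pvRuns x 1 xs)).headD 0 = (pvRuns x 1 xs).headD 0 := by
          rw [pvAcc_headD _ _ hm2]; ring
        have hlast : (pvAcc 0 (pvRuns x 1 xs)).getLast haccne
            = (pvRuns x 1 xs).sum - (pvRuns x 1 xs).getLast?.getD 0 := by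
          have h1 := pvAcc_getLast? (pvRuns x 1 xs) 0 hm2
          rw [List.getLast?_eq_some_getLast haccne] at h1
          have h2 := Option.some.inj h1
          rw [h2]; ring
        rw [hhead, hlast]
        have hwrap : PySem.Int.mod
            ((pvRuns x 1 xs).headD 0 - ((pvRuns x 1 xs).sum - (pvRuns x 1 xs).getLast?.getD 0))
            (((x :: xs).length : Nat) : Int)
            = (pvRuns x 1 xs).headD 0 + (pvRuns x 1 xs).getLast?.getD 0 := by
          rw [hL]
          rw [show (pvRuns x 1 xs).headD 0 - ((pvRuns x 1 xs).sum - (pvRuns x 1 xs).getLast?.getD 0)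
              = ((pvRuns x 1 xs).headD 0 + (pvRuns x 1 xs).getLast?.getD 0)
                - (1 + (xs.length : Int)) by rw [hsum]; ring]
          exact mod_wrap _ _ (by omega) (by omega)
        rw [hwrap]
        have htail : (List.zip (pvAcc 0 (pvRuns x 1 xs)) (pvAcc 0 (pvRuns x 1 xs)).tail).map
              (fun pr => PySem.Int.mod (pr.2 - pr.1) (((x :: xs).length : Nat) : Int))
            = (pvRuns x 1 xs).tail.dropLast := by
          rw [show (fun pr : Int × Int => PySem.Int.mod (pr.2 - pr.1) (((x :: xs).length : Nat) : Int))
              = (fun z => PySem.Int.mod z (((x :: xs).length : Nat) : Int))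
                ∘ (fun pr : Int × Int => pr.2 - pr.1) from rfl]
          rw [← List.map_map, gaps_acc (pvRuns x 1 xs) 0]
          rw [List.map_congr_left (g := fun y => y)]
          · exact List.map_id _
          · intro y hy
            have hymem := hmidsub y hy
            rw [hL]
            exact mod_small y _ (by have := hpos y hymem; omega) (hbound y hymem)
        rw [htail]
        have hcond : (1 < (((pvRuns x 1 xs).length : Nat) : Int) ∧
            x = (x :: xs).getLast (by simp)) := by
          constructor
          · have : (2 : Int) ≤ ((pvRuns x 1 xs).length : Int) := by exact_mod_cast hm2
            omega
          · exact hgx.symm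
        rw [if_pos hcond, hMD, hgetLast]
        apply maxD_eq
        · -- the B value occurs among A's domain sizes
          rcases le_total M ((pvRuns x 1 xs).headD 0 + (pvRuns x 1 xs).getLast?.getD 0) with hc | hc
          · rw [max_eq_right hc]; simp
          · rw [max_eq_left hc]
            rw [hshape] at hMmem
            simp only [List.cons_append, List.mem_cons, List.mem_append] at hMmem
            rcases hMmem with rfl | hMmid | rfl | hfalse
            · omega
            · simp [hMmid]
            · omega
            · simp at hfalse
        · intro y hy
          rcases List.mem_cons.1 hy with rfl | hymid
          · exact le_max_right _ _
          · exact le_trans (hMub y (hmidsub y hymid)) (le_max_left _ _)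
      · -- not wrapped: position 0 is a wall, the runs are exactly the domains
        rw [if_neg hgx]
        rw [show ([0] : List Int) ++ pvAcc 0 (pvRuns x 1 xs)
            = 0 :: pvAcc 0 (pvRuns x 1 xs) from rfl]
        rw [if_neg (by simp : ¬(0 :: pvAcc 0 (pvRuns x 1 xs) : List Int) = [])]
        rw [sizes_eq (0 :: pvAcc 0 (pvRuns x 1 xs)) _ (by simp)]
        have hlast : (0 :: pvAcc 0 (pvRuns x 1 xs)).getLast (by simp)
            = (pvRuns x 1 xs).sum - (pvRuns x 1 xs).getLast?.getD 0 := by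
          have h1 := pvAcc_getLast? (pvRuns x 1 xs) 0 hm2
          rw [← getLast?_cons_ne (0 : Int) _ haccne] at h1
          rw [List.getLast?_eq_some_getLast
            (by simp : (0 :: pvAcc 0 (pvRuns x 1 xs) : List Int) ≠ [])] at h1
          have h2 := Option.some.inj h1
          rw [h2]; ring
        rw [hlast, List.headD_cons]
        have hwrap : PySem.Int.mod
            (0 - ((pvRuns x 1 xs).sum - (pvRuns x 1 xs).getLast?.getD 0))
            (((x :: xs).length : Nat) : Int)
            = (pvRuns x 1 xs).getLast?.getD 0 := by
          rw [hL]
          rw [show (0 : Int) - ((pvRuns x 1 xs).sum - (pvRuns x 1 xs).getLast?.getD 0)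
              = (pvRuns x 1 xs).getLast?.getD 0 - (1 + (xs.length : Int)) by rw [hsum]; ring]
          exact mod_wrap _ _ (by omega) (hbound _ (lastD_mem hne))
        rw [hwrap]
        have htail : (List.zip (0 :: pvAcc 0 (pvRuns x 1 xs)) (0 :: pvAcc 0 (pvRuns x 1 xs)).tail).map
              (fun pr => PySem.Int.mod (pr.2 - pr.1) (((x :: xs).length : Nat) : Int))
            = (pvRuns x 1 xs).dropLast := by
          rw [List.tail_cons]
          rw [show (fun pr : Int × Int => PySem.Int.mod (pr.2 - pr.1) (((x :: xs).length : Nat) : Int))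
              = (fun z => PySem.Int.mod z (((x :: xs).length : Nat) : Int))
                ∘ (fun pr : Int × Int => pr.2 - pr.1) from rfl]
          rw [← List.map_map, gaps_cons_acc (pvRuns x 1 xs) 0]
          rw [List.map_congr_left (g := fun y => y)]
          · exact List.map_id _
          · intro y hy
            have hymem : y ∈ pvRuns x 1 xs := List.dropLast_subset _ hy
            rw [hL]
            exact mod_small y _ (by have := hpos y hymem; omega) (hbound y hymem)
        rw [htail]
        have hcond : ¬ (1 < (((pvRuns x 1 xs).length : Nat) : Int) ∧
            x = (x :: xs).getLast (by simp)) := by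
          rintro ⟨-, h⟩
          exact hgx h.symm
        rw [if_neg hcond, hMD]
        have hdrop : (pvRuns x 1 xs).dropLast
            = (pvRuns x 1 xs).headD 0 :: (pvRuns x 1 xs).tail.dropLast := by
          conv_lhs => rw [hshape]
          rw [List.dropLast_concat]
        apply maxD_eq
        · rw [hshape] at hMmem
          simp only [List.cons_append, List.mem_cons, List.mem_append] at hMmem
          rw [hdrop]
          rcases hMmem with rfl | hMmid | rfl | hfalse
          · simp
          · simp [hMmid]
          · simp
          · simp at hfalse
        · intro y hy
          rcases List.mem_cons.1 hy with rfl | hyd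
          · exact hMub _ (lastD_mem hne)
          · exact hMub y (List.dropLast_subset _ hyd)
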